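-- pv_equiv track=rewrite | github.com/adrianmoac/clone-code-detection | originalDataset/1344147.py | solve
-- ===== SOURCE A (Python) =====
-- def solve(N, a):
--     count = [0] * 9
--     for ele in a:
--         if 1 <= ele <= 399:
--             count[0] = 1
--         elif 400 <= ele <= 799:
--             count[1] = 1
--         elif 800 <= ele <= 1199:
--             count[2] = 1
--         elif 1200 <= ele <= 1599:
--             count[3] = 1
--         elif 1600 <= ele <= 1999:
--             count[4] = 1
--         elif 2000 <= ele <= 2399:
--             count[5] = 1
--         elif 2400 <= ele <= 2799:
--             count[6] = 1
--         elif 2800 <= ele <= 3199: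
--             count[7] = 1
--         elif ele >= 3200:
--             count[8] += 1
--
--     num_else = sum(count[0: 8])
--     ans_max = sum(count)
--     if num_else == 0:
--         ans_min = 1
--     else:
--         ans_min = num_else
--
--     ans = (ans_min, ans_max)
--     return ans
-- ===== SOURCE B (Python) =====
-- def solve(N, a):
--     d = sum(any(max(1, 400 * k) <= ele <= 400 * k + 399 for ele in a) for k in range(8))
--     free = sum(ele >= 3200 for ele in a)
--     return (max(d, 1), d + free)
-- ===== Notes on version B (the rewrite author's own statement) =====
-- stated objective: alternative
-- what changed: Inverts the loop structure: instead of one pass over the elements updating a 9-slot flag list via a 9-way if/elif cascade, B iterates over the 8 rating bands and asks for each whether ANY element falls in it (existence query per band), plus a separate pass counting ratings >= 3200; no per-element mutable flag state remains.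
import Mathlib
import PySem

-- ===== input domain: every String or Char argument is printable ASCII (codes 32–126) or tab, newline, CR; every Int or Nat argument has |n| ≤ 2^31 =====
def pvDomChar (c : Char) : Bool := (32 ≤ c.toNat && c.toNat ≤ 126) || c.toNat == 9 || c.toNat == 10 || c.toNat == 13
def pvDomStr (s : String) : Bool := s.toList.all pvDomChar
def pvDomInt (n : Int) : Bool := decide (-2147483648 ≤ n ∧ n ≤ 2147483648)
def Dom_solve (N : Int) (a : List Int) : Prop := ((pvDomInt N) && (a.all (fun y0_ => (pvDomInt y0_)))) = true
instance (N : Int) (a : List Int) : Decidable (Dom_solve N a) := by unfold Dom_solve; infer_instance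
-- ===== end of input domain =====

-- B inverts the loop structure: instead of one pass over the elements updating a 9-slot
-- flag list through a 9-way if/elif cascade, it asks for each of the 8 rating bands
-- whether ANY element falls in it, and counts ratings >= 3200 in a separate pass (alternative).

-- ===== PORT A =====
-- one loop step of A: the 9-way range cascade setting flags in the 9-slot list
def solveStep (count : List Int) (ele : Int) : List Int :=
  if 1 ≤ ele ∧ ele ≤ 399 then count.set 0 1
  else if 400 ≤ ele ∧ ele ≤ 799 then count.set 1 1
  else if 800 ≤ ele ∧ ele ≤ 1199 then count.set 2 1
  else if 1200 ≤ ele ∧ ele ≤ 1599 then count.set 3 1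
  else if 1600 ≤ ele ∧ ele ≤ 1999 then count.set 4 1
  else if 2000 ≤ ele ∧ ele ≤ 2399 then count.set 5 1
  else if 2400 ≤ ele ∧ ele ≤ 2799 then count.set 6 1
  else if 2800 ≤ ele ∧ ele ≤ 3199 then count.set 7 1
  else if 3200 ≤ ele then count.set 8 (count.getD 8 0 + 1)
  else count

def solve (N : Int) (a : List Int) : Int × Int :=
  let count := a.foldl solveStep (List.replicate 9 0)
  let num_else := (count.take 8).sum
  let ans_max := count.sum
  let ans_min := if num_else = 0 then 1 else num_else
  (ans_min, ans_max)

-- ===== PORT B =====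
-- max(1, 400*k) <= ele <= 400*k + 399, the band-k membership test of Source B
def inBand (k : Nat) (e : Int) : Bool := decide (max 1 (400 * (k : Int)) ≤ e ∧ e ≤ 400 * (k : Int) + 399)

def solve_alt (N : Int) (a : List Int) : Int × Int :=
  let d : Int := ((List.range 8).map (fun k => if a.any (inBand k) then (1 : Int) else 0)).sum
  let free : Int := (a.map (fun e => if 3200 ≤ e then (1 : Int) else 0)).sum
  (max d 1, d + free)

-- ===== PRECONDITION & SPEC =====
def Spec_solve (N : Int) (a : List Int) (out : Int × Int) : Prop := out = solve_alt N a
instance (N : Int) (a : List Int) (out : Int × Int) : Decidable (Spec_solve N a out) := by unfold Spec_solve; infer_instance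

-- ===== CLAIM (what is proved, stated in full; the proofs are below) =====
def Claim_equal_solve : Prop := ∀ (N : Int) (a : List Int), Dom_solve N a → Spec_solve N a (solve N a)

-- ===== LEMMAS AND PROOFS =====

-- closed form of A's fold: slot k holds 1 iff some element hits band k (else its start value),
-- slot 8 accumulates the count of elements ≥ 3200
set_option maxHeartbeats 800000 in
lemma solve_foldl_closed (a : List Int) : ∀ c0 c1 c2 c3 c4 c5 c6 c7 f : Int,
    a.foldl solveStep [c0, c1, c2, c3, c4, c5, c6, c7, f] =
      [if a.any (inBand 0) then 1 else c0, if a.any (inBand 1) then 1 else c1,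
       if a.any (inBand 2) then 1 else c2, if a.any (inBand 3) then 1 else c3,
       if a.any (inBand 4) then 1 else c4, if a.any (inBand 5) then 1 else c5,
       if a.any (inBand 6) then 1 else c6, if a.any (inBand 7) then 1 else c7,
       f + (a.map (fun e => if 3200 ≤ e then (1 : Int) else 0)).sum] := by
  induction a with
  | nil => intro c0 c1 c2 c3 c4 c5 c6 c7 f; simp
  | cons e xs ih =>
    intro c0 c1 c2 c3 c4 c5 c6 c7 f
    by_cases h0 : 1 ≤ e ∧ e ≤ 399
    · have hs : solveStep [c0, c1, c2, c3, c4, c5, c6, c7, f] e = [1, c1, c2, c3, c4, c5, c6, c7, f] := by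
        simp only [solveStep]; rw [if_pos h0]; rfl
      rw [List.foldl_cons, hs, ih]
      have e0 : inBand 0 e = true := by simp [inBand]; omega
      have e1 : inBand 1 e = false := by simp [inBand]; omega
      have e2 : inBand 2 e = false := by simp [inBand]; omega
      have e3 : inBand 3 e = false := by simp [inBand]; omega
      have e4 : inBand 4 e = false := by simp [inBand]; omega
      have e5 : inBand 5 e = false := by simp [inBand]; omega
      have e6 : inBand 6 e = false := by simp [inBand]; omega
      have e7 : inBand 7 e = false := by simp [inBand]; omega
      have e8 : ¬ (3200 ≤ e) := by omega
      simp [List.any_cons, e0, e1, e2, e3, e4, e5, e6, e7, e8]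
    by_cases h1 : 400 ≤ e ∧ e ≤ 799
    · have hs : solveStep [c0, c1, c2, c3, c4, c5, c6, c7, f] e = [c0, 1, c2, c3, c4, c5, c6, c7, f] := by
        simp only [solveStep]; rw [if_neg h0, if_pos h1]; rfl
      rw [List.foldl_cons, hs, ih]
      have e0 : inBand 0 e = false := by simp [inBand]; omega
      have e1 : inBand 1 e = true := by simp [inBand]; omega
      have e2 : inBand 2 e = false := by simp [inBand]; omega
      have e3 : inBand 3 e = false := by simp [inBand]; omega
      have e4 : inBand 4 e = false := by simp [inBand]; omega
      have e5 : inBand 5 e = false := by simp [inBand]; omega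
      have e6 : inBand 6 e = false := by simp [inBand]; omega
      have e7 : inBand 7 e = false := by simp [inBand]; omega
      have e8 : ¬ (3200 ≤ e) := by omega
      simp [List.any_cons, e0, e1, e2, e3, e4, e5, e6, e7, e8]
    by_cases h2 : 800 ≤ e ∧ e ≤ 1199
    · have hs : solveStep [c0, c1, c2, c3, c4, c5, c6, c7, f] e = [c0, c1, 1, c3, c4, c5, c6, c7, f] := by
        simp only [solveStep]; rw [if_neg h0, if_neg h1, if_pos h2]; rfl
      rw [List.foldl_cons, hs, ih]
      have e0 : inBand 0 e = false := by simp [inBand]; omega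
      have e1 : inBand 1 e = false := by simp [inBand]; omega
      have e2 : inBand 2 e = true := by simp [inBand]; omega
      have e3 : inBand 3 e = false := by simp [inBand]; omega
      have e4 : inBand 4 e = false := by simp [inBand]; omega
      have e5 : inBand 5 e = false := by simp [inBand]; omega
      have e6 : inBand 6 e = false := by simp [inBand]; omega
      have e7 : inBand 7 e = false := by simp [inBand]; omega
      have e8 : ¬ (3200 ≤ e) := by omega
      simp [List.any_cons, e0, e1, e2, e3, e4, e5, e6, e7, e8]
    by_cases h3 : 1200 ≤ e ∧ e ≤ 1599
    · have hs : solveStep [c0, c1, c2, c3, c4, c5, c6, c7, f] e = [c0, c1, c2, 1, c4, c5, c6, c7, f] := by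
        simp only [solveStep]; rw [if_neg h0, if_neg h1, if_neg h2, if_pos h3]; rfl
      rw [List.foldl_cons, hs, ih]
      have e0 : inBand 0 e = false := by simp [inBand]; omega
      have e1 : inBand 1 e = false := by simp [inBand]; omega
      have e2 : inBand 2 e = false := by simp [inBand]; omega
      have e3 : inBand 3 e = true := by simp [inBand]; omega
      have e4 : inBand 4 e = false := by simp [inBand]; omega
      have e5 : inBand 5 e = false := by simp [inBand]; omega
      have e6 : inBand 6 e = false := by simp [inBand]; omega
      have e7 : inBand 7 e = false := by simp [inBand]; omega
      have e8 : ¬ (3200 ≤ e) := by omega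
      simp [List.any_cons, e0, e1, e2, e3, e4, e5, e6, e7, e8]
    by_cases h4 : 1600 ≤ e ∧ e ≤ 1999
    · have hs : solveStep [c0, c1, c2, c3, c4, c5, c6, c7, f] e = [c0, c1, c2, c3, 1, c5, c6, c7, f] := by
        simp only [solveStep]; rw [if_neg h0, if_neg h1, if_neg h2, if_neg h3, if_pos h4]; rfl
      rw [List.foldl_cons, hs, ih]
      have e0 : inBand 0 e = false := by simp [inBand]; omega
      have e1 : inBand 1 e = false := by simp [inBand]; omega
      have e2 : inBand 2 e = false := by simp [inBand]; omega
      have e3 : inBand 3 e = false := by simp [inBand]; omega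
      have e4 : inBand 4 e = true := by simp [inBand]; omega
      have e5 : inBand 5 e = false := by simp [inBand]; omega
      have e6 : inBand 6 e = false := by simp [inBand]; omega
      have e7 : inBand 7 e = false := by simp [inBand]; omega
      have e8 : ¬ (3200 ≤ e) := by omega
      simp [List.any_cons, e0, e1, e2, e3, e4, e5, e6, e7, e8]
    by_cases h5 : 2000 ≤ e ∧ e ≤ 2399
    · have hs : solveStep [c0, c1, c2, c3, c4, c5, c6, c7, f] e = [c0, c1, c2, c3, c4, 1, c6, c7, f] := by
        simp only [solveStep]; rw [if_neg h0, if_neg h1, if_neg h2, if_neg h3, if_neg h4, if_pos h5]; rfl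
      rw [List.foldl_cons, hs, ih]
      have e0 : inBand 0 e = false := by simp [inBand]; omega
      have e1 : inBand 1 e = false := by simp [inBand]; omega
      have e2 : inBand 2 e = false := by simp [inBand]; omega
      have e3 : inBand 3 e = false := by simp [inBand]; omega
      have e4 : inBand 4 e = false := by simp [inBand]; omega
      have e5 : inBand 5 e = true := by simp [inBand]; omega
      have e6 : inBand 6 e = false := by simp [inBand]; omega
      have e7 : inBand 7 e = false := by simp [inBand]; omega
      have e8 : ¬ (3200 ≤ e) := by omega
      simp [List.any_cons, e0, e1, e2, e3, e4, e5, e6, e7, e8]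
    by_cases h6 : 2400 ≤ e ∧ e ≤ 2799
    · have hs : solveStep [c0, c1, c2, c3, c4, c5, c6, c7, f] e = [c0, c1, c2, c3, c4, c5, 1, c7, f] := by
        simp only [solveStep]; rw [if_neg h0, if_neg h1, if_neg h2, if_neg h3, if_neg h4, if_neg h5, if_pos h6]; rfl
      rw [List.foldl_cons, hs, ih]
      have e0 : inBand 0 e = false := by simp [inBand]; omega
      have e1 : inBand 1 e = false := by simp [inBand]; omega
      have e2 : inBand 2 e = false := by simp [inBand]; omega
      have e3 : inBand 3 e = false := by simp [inBand]; omega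
      have e4 : inBand 4 e = false := by simp [inBand]; omega
      have e5 : inBand 5 e = false := by simp [inBand]; omega
      have e6 : inBand 6 e = true := by simp [inBand]; omega
      have e7 : inBand 7 e = false := by simp [inBand]; omega
      have e8 : ¬ (3200 ≤ e) := by omega
      simp [List.any_cons, e0, e1, e2, e3, e4, e5, e6, e7, e8]
    by_cases h7 : 2800 ≤ e ∧ e ≤ 3199
    · have hs : solveStep [c0, c1, c2, c3, c4, c5, c6, c7, f] e = [c0, c1, c2, c3, c4, c5, c6, 1, f] := by
        simp only [solveStep]; rw [if_neg h0, if_neg h1, if_neg h2, if_neg h3, if_neg h4, if_neg h5, if_neg h6, if_pos h7]; rfl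
      rw [List.foldl_cons, hs, ih]
      have e0 : inBand 0 e = false := by simp [inBand]; omega
      have e1 : inBand 1 e = false := by simp [inBand]; omega
      have e2 : inBand 2 e = false := by simp [inBand]; omega
      have e3 : inBand 3 e = false := by simp [inBand]; omega
      have e4 : inBand 4 e = false := by simp [inBand]; omega
      have e5 : inBand 5 e = false := by simp [inBand]; omega
      have e6 : inBand 6 e = false := by simp [inBand]; omega
      have e7 : inBand 7 e = true := by simp [inBand]; omega
      have e8 : ¬ (3200 ≤ e) := by omega
      simp [List.any_cons, e0, e1, e2, e3, e4, e5, e6, e7, e8]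
    by_cases h8 : 3200 ≤ e
    · have hs : solveStep [c0, c1, c2, c3, c4, c5, c6, c7, f] e = [c0, c1, c2, c3, c4, c5, c6, c7, f + 1] := by
        simp only [solveStep]; rw [if_neg h0, if_neg h1, if_neg h2, if_neg h3, if_neg h4, if_neg h5, if_neg h6, if_neg h7, if_pos h8]; rfl
      rw [List.foldl_cons, hs, ih]
      have e0 : inBand 0 e = false := by simp [inBand]; omega
      have e1 : inBand 1 e = false := by simp [inBand]; omega
      have e2 : inBand 2 e = false := by simp [inBand]; omega
      have e3 : inBand 3 e = false := by simp [inBand]; omega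
      have e4 : inBand 4 e = false := by simp [inBand]; omega
      have e5 : inBand 5 e = false := by simp [inBand]; omega
      have e6 : inBand 6 e = false := by simp [inBand]; omega
      have e7 : inBand 7 e = false := by simp [inBand]; omega
      simp [List.any_cons, e0, e1, e2, e3, e4, e5, e6, e7, h8]
      ring
    have hs : solveStep [c0, c1, c2, c3, c4, c5, c6, c7, f] e = [c0, c1, c2, c3, c4, c5, c6, c7, f] := by
      simp only [solveStep]; rw [if_neg h0, if_neg h1, if_neg h2, if_neg h3, if_neg h4, if_neg h5, if_neg h6, if_neg h7, if_neg h8]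
    rw [List.foldl_cons, hs, ih]
    have e0 : inBand 0 e = false := by simp [inBand]; omega
    have e1 : inBand 1 e = false := by simp [inBand]; omega
    have e2 : inBand 2 e = false := by simp [inBand]; omega
    have e3 : inBand 3 e = false := by simp [inBand]; omega
    have e4 : inBand 4 e = false := by simp [inBand]; omega
    have e5 : inBand 5 e = false := by simp [inBand]; omega
    have e6 : inBand 6 e = false := by simp [inBand]; omega
    have e7 : inBand 7 e = false := by simp [inBand]; omega
    have e8 : ¬ (3200 ≤ e) := by omega
    simp [List.any_cons, e0, e1, e2, e3, e4, e5, e6, e7, e8]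

-- ===== VERDICT (by name: the statement is the Claim_ definition above) =====
theorem solve_spec : Claim_equal_solve := by
  intro N a _
  unfold Spec_solve
  simp only [solve, solve_alt]
  rw [show (List.replicate 9 (0 : Int)) = [0, 0, 0, 0, 0, 0, 0, 0, 0] from rfl,
    solve_foldl_closed, show (List.range 8) = [0, 1, 2, 3, 4, 5, 6, 7] from rfl]
  simp only [List.map_cons, List.map_nil, List.sum_cons, List.sum_nil,
    List.take_succ_cons, List.take_zero]
  have hnn : ∀ b : Bool, (0 : Int) ≤ (if b = true then (1 : Int) else 0) := by
    intro b; split_ifs <;> norm_num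
  have h0 := hnn (a.any (inBand 0)); have h1 := hnn (a.any (inBand 1))
  have h2 := hnn (a.any (inBand 2)); have h3 := hnn (a.any (inBand 3))
  have h4 := hnn (a.any (inBand 4)); have h5 := hnn (a.any (inBand 5))
  have h6 := hnn (a.any (inBand 6)); have h7 := hnn (a.any (inBand 7))
  rw [Prod.mk.injEq]
  constructor <;> omega
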